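-- pv_equiv track=rewrite | github.com/girikuncoro/fsociety | fsociety-backend/util/twitter.py | get_paragraph
-- ===== SOURCE A (Python) =====
-- TWEET_IN_PARAGRAPH = 4
--
-- def get_paragraph(count, tweets):
-- 	paragraphs = []
-- 	for i in range(count):
-- 		text = ''
-- 		for j in range(TWEET_IN_PARAGRAPH):
-- 			text += tweets.pop()
-- 		paragraphs.append(text)
-- 	return paragraphs
-- ===== SOURCE B (Python) =====
-- TWEET_IN_PARAGRAPH = 4
--
-- def get_paragraph(count, tweets):
-- 	total = count * TWEET_IN_PARAGRAPH
-- 	buf = []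
-- 	for i in range(total):
-- 		buf.append(tweets.pop())
-- 	return [''.join(buf[i:i + TWEET_IN_PARAGRAPH]) for i in range(0, total, TWEET_IN_PARAGRAPH)]
-- ===== Notes on version B (the rewrite author's own statement) =====
-- stated objective: alternative
-- what changed: B separates the work into two passes -- it first pops all count*4 tweets into one flat buffer list, then builds each paragraph by joining a stride-of-4 slice of that buffer with ''.join -- instead of A's interleaved nested loop that accumulates each paragraph with repeated string += while popping.
import Mathlib
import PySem

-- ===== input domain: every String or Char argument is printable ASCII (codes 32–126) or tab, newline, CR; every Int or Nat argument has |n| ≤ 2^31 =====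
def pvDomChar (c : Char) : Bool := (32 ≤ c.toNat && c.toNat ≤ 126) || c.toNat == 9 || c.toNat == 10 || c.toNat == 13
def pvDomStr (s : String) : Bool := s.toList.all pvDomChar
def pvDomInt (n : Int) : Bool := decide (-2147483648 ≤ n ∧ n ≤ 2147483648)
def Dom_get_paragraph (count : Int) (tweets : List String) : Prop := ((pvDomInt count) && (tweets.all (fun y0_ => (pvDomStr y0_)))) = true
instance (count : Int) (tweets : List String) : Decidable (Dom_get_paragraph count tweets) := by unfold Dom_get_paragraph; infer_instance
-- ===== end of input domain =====

-- B pops all count*4 tweets into one flat buffer and then joins stride-of-4 slices, instead of A's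
-- interleaved nested loop (objective: alternative decomposition, same cost). Both A and B pop the same
-- 4*count elements off `tweets` in place; the equivalence proved here is about the return value.

-- ===== PORT A =====
-- string accumulation `text += tweets.pop()` is ported on the List Char side (String.append is opaque
-- to the kernel); `tweets.pop()` is PySem.List.pop? with its default index -1: `none` = IndexError,
-- which Pre_ excludes, so the `none` branch (which just keeps the state) is never reached on Pre_.
def get_paragraph (count : Int) (tweets : List String) : List String :=
  ((PySem.List.pyRange 0 count 1).foldl
    (fun (st : List String × List String) _ =>
      let inner := (PySem.List.pyRange 0 4 1).foldl
        (fun (s : List Char × List String) _ =>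
          match PySem.List.pop? s.2 with
          | some (v, rest) => (s.1 ++ v.toList, rest)
          | none => s)
        (([] : List Char), st.2)
      (st.1 ++ [String.ofList inner.1], inner.2))
    (([] : List String), tweets)).1

-- ===== PORT B =====
def get_paragraph_alt (count : Int) (tweets : List String) : List String :=
  let total := count * 4
  let buf := ((PySem.List.pyRange 0 total 1).foldl
      (fun (s : List String × List String) _ =>
        match PySem.List.pop? s.2 with
        | some (v, rest) => (s.1 ++ [v], rest)
        | none => s)
      (([] : List String), tweets)).1
  (PySem.List.pyRange 0 total 4).map
    (fun i => PySem.Str.join "" (PySem.List.slice buf (some i) (some (i + 4))))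

-- ===== PRECONDITION & SPEC =====
-- Pre_ excludes exactly the inputs on which the Python A raises IndexError (a positive count with
-- fewer than 4*count tweets available); B raises the same IndexError there.
def Pre_get_paragraph (count : Int) (tweets : List String) : Prop :=
  count ≤ 0 ∨ 4 * count ≤ (tweets.length : Int)
instance (count : Int) (tweets : List String) : Decidable (Pre_get_paragraph count tweets) := by
  unfold Pre_get_paragraph; infer_instance
def pvWitness_get_paragraph : Int × List String := (1, ["a", "b", "c", "d"])

def Spec_get_paragraph (count : Int) (tweets : List String) (out : List String) : Prop := out = get_paragraph_alt count tweets
instance (count : Int) (tweets : List String) (out : List String) : Decidable (Spec_get_paragraph count tweets out) := by unfold Spec_get_paragraph; infer_instance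

-- ===== CLAIM (what is proved, stated in full; the proofs are below) =====
def Claim_equal_get_paragraph : Prop := ∀ (count : Int) (tweets : List String), Dom_get_paragraph count tweets → Pre_get_paragraph count tweets → Spec_get_paragraph count tweets (get_paragraph count tweets)

-- ===== LEMMAS AND PROOFS =====

-- the body of A's outer loop, as a function of the loop state
def stepA : List String × List String → List String × List String :=
  fun st =>
    let inner := (PySem.List.pyRange 0 4 1).foldl
      (fun (s : List Char × List String) _ =>
        match PySem.List.pop? s.2 with
        | some (v, rest) => (s.1 ++ v.toList, rest)
        | none => s)
      (([] : List Char), st.2)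
    (st.1 ++ [String.ofList inner.1], inner.2)

-- the body of B's buffer loop
def stepB : List String × List String → List String × List String :=
  fun s =>
    match PySem.List.pop? s.2 with
    | some (v, rest) => (s.1 ++ [v], rest)
    | none => s

-- reference result: n paragraphs read off the reversed tweet list in chunks of 4
def Gp : Nat → List String → List String
  | 0, _ => []
  | n + 1, r => PySem.Str.join "" (r.take 4) :: Gp n (r.drop 4)

lemma foldl_const {α β : Type} (g : β → β) (init : β) (l : List α) :
    l.foldl (fun s _ => g s) init = g^[l.length] init := by
  induction l generalizing init with
  | nil => rfl
  | cons x xs ih => simp [List.foldl, ih, Function.iterate_succ_apply]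

lemma A_foldl (init : List String × List String) (l : List Int) :
    List.foldl
      (fun (st : List String × List String) _ =>
        let inner := (PySem.List.pyRange 0 4 1).foldl
          (fun (s : List Char × List String) _ =>
            match PySem.List.pop? s.2 with
            | some (v, rest) => (s.1 ++ v.toList, rest)
            | none => s)
          (([] : List Char), st.2)
        (st.1 ++ [String.ofList inner.1], inner.2)) init l = stepA^[l.length] init :=
  foldl_const stepA init l

lemma B_foldl (init : List String × List String) (l : List Int) :
    List.foldl
      (fun (s : List String × List String) _ =>
        match PySem.List.pop? s.2 with
        | some (v, rest) => (s.1 ++ [v], rest)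
        | none => s) init l = stepB^[l.length] init :=
  foldl_const stepB init l

lemma exists_four {α : Type} : ∀ (l : List α), 4 ≤ l.length → ∃ a b c d r, l = a :: b :: c :: d :: r
  | a :: b :: c :: d :: r, _ => ⟨a, b, c, d, r, rfl⟩
  | [], h => by simp at h
  | [a], h => by simp at h
  | [a, b], h => by simp at h
  | [a, b, c], h => by simp at h

lemma join4 (a b c d : String) :
    PySem.Str.join "" [a, b, c, d] = String.ofList (a.toList ++ (b.toList ++ (c.toList ++ d.toList))) := by
  simp [PySem.Str.join, PySem.Chars.join, List.intercalate, List.intersperse]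

lemma stepA_eq (acc l : List String) (a b c d : String) :
    stepA (acc, l ++ [d, c, b, a]) = (acc ++ [PySem.Str.join "" [a, b, c, d]], l) := by
  have h4 : PySem.List.pyRange 0 4 1 = [0, 1, 2, 3] := by decide
  have p1 : PySem.List.pop? (l ++ [d, c, b, a]) = some (a, l ++ [d, c, b]) := by
    simpa using PySem.List.pop?_last (l ++ [d, c, b]) a
  have p2 : PySem.List.pop? (l ++ [d, c, b]) = some (b, l ++ [d, c]) := by
    simpa using PySem.List.pop?_last (l ++ [d, c]) b
  have p3' : PySem.List.pop? (l ++ [d, c]) = some (c, l ++ [d]) := by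
    simpa using PySem.List.pop?_last (l ++ [d]) c
  have p4 : PySem.List.pop? (l ++ [d]) = some (d, l) := PySem.List.pop?_last l d
  simp [stepA, h4, List.foldl, p1, p2, p3', p4, join4]

lemma stepB_eq (acc l : List String) (a : String) :
    stepB (acc, l ++ [a]) = (acc ++ [a], l) := by
  simp [stepB, PySem.List.pop?_last]

lemma A_iter (n : Nat) : ∀ (tw acc : List String), 4 * n ≤ tw.length →
    stepA^[n] (acc, tw) = (acc ++ Gp n tw.reverse, ((tw.reverse).drop (4 * n)).reverse) := by
  induction n with
  | zero => intro tw acc _; simp [Gp]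
  | succ n ih =>
    intro tw acc h
    have hlen : 4 ≤ tw.reverse.length := by simp; omega
    obtain ⟨a, b, c, d, r, hr⟩ := exists_four _ hlen
    have hrl : tw.length = r.length + 4 := by
      have h5 := congrArg List.length hr
      simp only [List.length_reverse, List.length_cons] at h5
      omega
    have htw : tw = r.reverse ++ [d, c, b, a] := by
      rw [← List.reverse_reverse tw, hr]; simp
    rw [Function.iterate_succ_apply, htw, stepA_eq,
      ih r.reverse (acc ++ [PySem.Str.join "" [a, b, c, d]]) (by simp; omega)]
    have hdrop : 4 * (n + 1) = 4 * n + 1 + 1 + 1 + 1 := by ring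
    simp [Gp, hdrop, List.drop_succ_cons]

lemma B_iter (m : Nat) : ∀ (tw acc : List String), m ≤ tw.length →
    stepB^[m] (acc, tw) = (acc ++ tw.reverse.take m, ((tw.reverse).drop m).reverse) := by
  induction m with
  | zero => intro tw acc _; simp
  | succ m ih =>
    intro tw acc h
    rcases hr : tw.reverse with _ | ⟨a, r⟩
    · exfalso
      have h5 := congrArg List.length hr
      simp only [List.length_reverse, List.length_nil] at h5
      omega
    · have hrl : tw.length = r.length + 1 := by
        have h5 := congrArg List.length hr
        simp only [List.length_reverse, List.length_cons] at h5
        omega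
      have htw : tw = r.reverse ++ [a] := by
        rw [← List.reverse_reverse tw, hr]; simp
      rw [Function.iterate_succ_apply, htw, stepB_eq,
        ih r.reverse (acc ++ [a]) (by simp; omega)]
      simp

lemma slice_grp (buf : List String) (k : Nat) :
    PySem.List.slice buf (some (4 * (k : Int))) (some (4 * (k : Int) + 4)) = (buf.drop (4 * k)).take 4 := by
  have h := PySem.List.slice_natCast buf (4 * k) (4 * k + 4)
  push_cast at h
  simpa using h

lemma pyRange_four (n : Nat) :
    PySem.List.pyRange 0 (4 * (n : Int)) 4 = (List.range n).map (fun (k : Nat) => 4 * (k : Int)) := by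
  rw [PySem.List.pyRange_of_pos _ _ (by norm_num : (0 : Int) < 4)]
  by_cases hn : 0 < n
  · rw [if_pos (by omega)]
    have he : (4 * (n : Int) - 0 + 4 - 1) / 4 = (n : Int) := by omega
    rw [he, Int.toNat_natCast]
    simp
  · have h0 : n = 0 := by omega
    subst h0; simp

lemma group_eq (n : Nat) : ∀ (buf : List String),
    (List.range n).map (fun k => PySem.Str.join "" ((buf.drop (4 * k)).take 4)) = Gp n buf := by
  induction n with
  | zero => intro buf; simp [Gp]
  | succ n ih =>
    intro buf
    rw [List.range_succ_eq_map, List.map_cons, List.map_map]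
    have ht : ((fun k => PySem.Str.join "" ((buf.drop (4 * k)).take 4)) ∘ Nat.succ)
        = (fun k => PySem.Str.join "" (((buf.drop 4).drop (4 * k)).take 4)) := by
      funext k
      have h1 : (buf.drop 4).drop (4 * k) = buf.drop (4 * Nat.succ k) := by
        rw [List.drop_drop]; congr 1; omega
      simp [Function.comp, h1]
    rw [ht, ih]
    simp [Gp]

lemma Gp_take (n : Nat) : ∀ (r : List String), Gp n (r.take (4 * n)) = Gp n r := by
  induction n with
  | zero => intro r; rfl
  | succ n ih =>
    intro r
    have harith : 4 * (n + 1) - 4 = 4 * n := by omega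
    have h1 : (r.take (4 * (n + 1))).take 4 = r.take 4 := by
      simp [List.take_take]
    have h2 : (r.take (4 * (n + 1))).drop 4 = (r.drop 4).take (4 * n) := by
      simp [List.drop_take, harith]
    simp [Gp, h1, h2, ih]

-- ===== VERDICT (by name: the statement is the Claim_ definition above) =====
theorem get_paragraph_spec : Claim_equal_get_paragraph := by
  intro count tweets _ hpre
  unfold Spec_get_paragraph
  by_cases hc : count ≤ 0
  · have h1 : PySem.List.pyRange 0 count 1 = [] := PySem.List.pyRange_one_eq_nil hc
    have h2 : PySem.List.pyRange 0 (count * 4) 4 = [] := by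
      rw [PySem.List.pyRange_of_pos _ _ (by norm_num : (0 : Int) < 4), if_neg (by omega)]
      simp
    simp [get_paragraph, get_paragraph_alt, h1, h2]
  · have hle : 4 * count.toNat ≤ tweets.length := by
      rcases hpre with h | h
      · omega
      · omega
    have hA : get_paragraph count tweets = Gp count.toNat tweets.reverse := by
      unfold get_paragraph
      rw [A_foldl, PySem.List.length_pyRange_one]
      have hn : (count - 0).toNat = count.toNat := by omega
      rw [hn, A_iter count.toNat tweets [] hle]
      simp
    have hB : get_paragraph_alt count tweets = Gp count.toNat (tweets.reverse.take (4 * count.toNat)) := by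
      simp only [get_paragraph_alt]
      rw [B_foldl, PySem.List.length_pyRange_one]
      have hm : (count * 4 - 0).toNat = 4 * count.toNat := by omega
      rw [hm, B_iter (4 * count.toNat) tweets [] hle]
      have hc4 : count * 4 = 4 * ((count.toNat : Nat) : Int) := by omega
      rw [hc4, pyRange_four, List.map_map]
      simp only [Function.comp_def, slice_grp]
      rw [group_eq]
      simp
    rw [hA, hB, Gp_take]
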